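-- pv_equiv track=rewrite | github.com/angel4004/SaleCheckUp-Signals-Radar | runtime/runner/review_gate.py | has_concrete_hold_next_step
-- ===== SOURCE A (Python) =====
-- from typing import Any, Dict, Iterable, List, Optional
--
-- ALLOWED_OWNER_STAGES = {"retrieval", "validator"}
--
-- def get_unresolved_contradictions(contradictions: List[Dict[str, Any]]) -> List[Dict[str, Any]]:
--     return [
--         contradiction
--         for contradiction in contradictions
--         if contradiction.get("current_resolution_state") in {"unresolved", "partially_resolved"}
--     ]
--
-- def has_concrete_hold_next_step(
--     next_step: Dict[str, str],
--     gaps: List[Dict[str, Any]],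
--     contradictions: List[Dict[str, Any]],
-- ) -> bool:
--     if not isinstance(next_step, dict):
--         return False
--
--     action = str(next_step.get("action", "")).strip()
--     owner_stage = str(next_step.get("owner_stage", "")).strip().lower()
--     target_id = str(next_step.get("target_gap_or_contradiction_id", "")).strip()
--     expected_effect = str(next_step.get("expected_decision_effect", "")).strip()
--     if not action or owner_stage not in ALLOWED_OWNER_STAGES or not expected_effect:
--         return False
--
--     valid_targets = {
--         str(gap.get("gap_id", "")).strip()
--         for gap in gaps
--         if str(gap.get("gap_id", "")).strip()
--     }
--     valid_targets.update(
--         str(contradiction.get("contradiction_id", "")).strip()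
--         for contradiction in get_unresolved_contradictions(contradictions)
--         if str(contradiction.get("contradiction_id", "")).strip()
--     )
--     return bool(target_id) and target_id in valid_targets
-- ===== SOURCE B (Python) =====
-- ALLOWED_OWNER_STAGES = {"retrieval", "validator"}
--
-- def has_concrete_hold_next_step(next_step, gaps, contradictions):
--     if not isinstance(next_step, dict):
--         return False
--
--     action = str(next_step.get("action", "")).strip()
--     owner_stage = str(next_step.get("owner_stage", "")).strip().lower()
--     target_id = str(next_step.get("target_gap_or_contradiction_id", "")).strip()
--     expected_effect = str(next_step.get("expected_decision_effect", "")).strip()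
--     if not action or owner_stage not in ALLOWED_OWNER_STAGES or not expected_effect:
--         return False
--     if not target_id:
--         return False
--
--     # sort-then-binary-search: gather every candidate id (empties are harmless,
--     # target_id is nonempty), sort the list, and locate target_id by bisection.
--     ids = [str(g.get("gap_id", "")).strip() for g in gaps]
--     ids += [
--         str(c.get("contradiction_id", "")).strip()
--         for c in contradictions
--         if c.get("current_resolution_state") in ("unresolved", "partially_resolved")
--     ]
--     ids.sort()
--     lo, hi = 0, len(ids)
--     while lo < hi:
--         mid = (lo + hi) // 2
--         if ids[mid] < target_id:
--             lo = mid + 1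
--         else:
--             hi = mid
--     return lo < len(ids) and ids[lo] == target_id
-- ===== Notes on version B (the rewrite author's own statement) =====
-- stated objective: alternative
-- what changed: Replaces A's build-a-hash-set-of-valid-targets-then-membership-lookup with a sort-then-binary-search: all candidate ids (gap ids plus ids of unresolved contradictions) are collected into one list, sorted, and the target id is located by a hand-written bisection loop.
import Mathlib
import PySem

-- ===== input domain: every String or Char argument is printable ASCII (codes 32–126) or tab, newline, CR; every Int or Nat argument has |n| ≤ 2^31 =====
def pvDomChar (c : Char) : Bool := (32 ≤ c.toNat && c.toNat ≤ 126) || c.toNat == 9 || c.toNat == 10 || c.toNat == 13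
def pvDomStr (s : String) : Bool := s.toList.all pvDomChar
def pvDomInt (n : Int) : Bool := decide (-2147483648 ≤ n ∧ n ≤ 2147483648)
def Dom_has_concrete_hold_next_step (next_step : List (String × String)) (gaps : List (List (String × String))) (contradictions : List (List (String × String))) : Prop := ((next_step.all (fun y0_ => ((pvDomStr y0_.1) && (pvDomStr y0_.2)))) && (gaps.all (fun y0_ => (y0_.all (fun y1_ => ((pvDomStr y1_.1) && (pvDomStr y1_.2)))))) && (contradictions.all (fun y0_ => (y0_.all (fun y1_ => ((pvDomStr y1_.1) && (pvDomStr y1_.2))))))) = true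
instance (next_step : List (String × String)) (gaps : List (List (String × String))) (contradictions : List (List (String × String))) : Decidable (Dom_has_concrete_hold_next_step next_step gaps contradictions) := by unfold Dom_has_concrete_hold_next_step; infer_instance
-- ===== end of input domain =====

-- B replaces A's build-a-hash-set-then-lookup with sort-then-binary-search over the
-- collected candidate ids: a different algorithm of similar cost (objective: alternative).

-- ===== PORT A =====
-- str(d.get(k, "")) on a str-valued dict: the get with default "" (str() is the identity here)
def pvStrGet (d : List (String × String)) (k : String) : String :=
  (PySem.Dict.mk d).getD k ""

-- get_unresolved_contradictions: keep those whose "current_resolution_state" is in the two-element set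
def pvGetUnresolved (contradictions : List (List (String × String))) : List (List (String × String)) :=
  contradictions.filter (fun c =>
    (PySem.Dict.mk c).get? "current_resolution_state" == some "unresolved" ||
    (PySem.Dict.mk c).get? "current_resolution_state" == some "partially_resolved")

def has_concrete_hold_next_step (next_step : List (String × String)) (gaps : List (List (String × String))) (contradictions : List (List (String × String))) : Bool :=
  -- isinstance(next_step, dict) is always true under the type convention
  let action := PySem.Str.strip (pvStrGet next_step "action")
  let owner_stage := PySem.Str.lower (PySem.Str.strip (pvStrGet next_step "owner_stage"))
  let target_id := PySem.Str.strip (pvStrGet next_step "target_gap_or_contradiction_id")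
  let expected_effect := PySem.Str.strip (pvStrGet next_step "expected_decision_effect")
  if action = "" ∨ ¬ (owner_stage = "retrieval" ∨ owner_stage = "validator") ∨ expected_effect = "" then
    false
  else
    let valid_targets : PySem.Set String :=
      PySem.Set.update
        (PySem.Set.ofList (gaps.filterMap (fun g =>
          let s := PySem.Str.strip (pvStrGet g "gap_id")
          if s ≠ "" then some s else none)))
        ((pvGetUnresolved contradictions).filterMap (fun c =>
          let s := PySem.Str.strip (pvStrGet c "contradiction_id")
          if s ≠ "" then some s else none))
    decide (target_id ≠ "") && PySem.Set.contains valid_targets target_id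

-- ===== PORT B =====
-- the while-loop bisection of Source B: lo, hi move exactly as in the Python loop
-- (ids[mid] is always in range since mid < hi ≤ len ids; getD is exact there)
def pvBSearch (ids : List String) (t : String) (lo hi : Nat) : Nat :=
  if lo < hi then
    let mid := (lo + hi) / 2
    if ids.getD mid "" < t then pvBSearch ids t (mid + 1) hi
    else pvBSearch ids t lo mid
  else lo
termination_by hi - lo
decreasing_by all_goals omega

def has_concrete_hold_next_step_alt (next_step : List (String × String)) (gaps : List (List (String × String))) (contradictions : List (List (String × String))) : Bool :=
  let action := PySem.Str.strip ((PySem.Dict.mk next_step).getD "action" "")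
  let owner_stage := PySem.Str.lower (PySem.Str.strip ((PySem.Dict.mk next_step).getD "owner_stage" ""))
  let target_id := PySem.Str.strip ((PySem.Dict.mk next_step).getD "target_gap_or_contradiction_id" "")
  let expected_effect := PySem.Str.strip ((PySem.Dict.mk next_step).getD "expected_decision_effect" "")
  if action = "" ∨ ¬ (owner_stage = "retrieval" ∨ owner_stage = "validator") ∨ expected_effect = "" then
    false
  else if target_id = "" then
    false
  else
    let ids :=
      gaps.map (fun g => PySem.Str.strip ((PySem.Dict.mk g).getD "gap_id" "")) ++
      (contradictions.filter (fun c =>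
        (PySem.Dict.mk c).get? "current_resolution_state" == some "unresolved" ||
        (PySem.Dict.mk c).get? "current_resolution_state" == some "partially_resolved")).map
        (fun c => PySem.Str.strip ((PySem.Dict.mk c).getD "contradiction_id" ""))
    let sortedIds := PySem.List.sorted ids (fun x => x) false
    let r := pvBSearch sortedIds target_id 0 sortedIds.length
    decide (r < sortedIds.length) && (sortedIds.getD r "" == target_id)

-- ===== PRECONDITION & SPEC =====
def Spec_has_concrete_hold_next_step (next_step : List (String × String)) (gaps : List (List (String × String))) (contradictions : List (List (String × String))) (out : Bool) : Prop := out = has_concrete_hold_next_step_alt next_step gaps contradictions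
instance (next_step : List (String × String)) (gaps : List (List (String × String))) (contradictions : List (List (String × String))) (out : Bool) : Decidable (Spec_has_concrete_hold_next_step next_step gaps contradictions out) := by unfold Spec_has_concrete_hold_next_step; infer_instance

-- ===== CLAIM (what is proved, stated in full; the proofs are below) =====
def Claim_equal_has_concrete_hold_next_step : Prop := ∀ (next_step : List (String × String)) (gaps : List (List (String × String))) (contradictions : List (List (String × String))), Dom_has_concrete_hold_next_step next_step gaps contradictions → Spec_has_concrete_hold_next_step next_step gaps contradictions (has_concrete_hold_next_step next_step gaps contradictions)

-- ===== LEMMAS AND PROOFS =====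

-- binary-search invariant: on a ≤-sorted list, with everything left of lo below t and
-- everything from hi on at least t, the bisection result answers membership of t
theorem pvBSearch_mem (ids : List String) (t : String) (hs : ids.Pairwise (· ≤ ·)) :
    ∀ n lo hi, hi - lo = n → hi ≤ ids.length →
    (∀ i (h : i < ids.length), i < lo → ids[i] < t) →
    (∀ i (h : i < ids.length), hi ≤ i → t ≤ ids[i]) →
    ((decide (pvBSearch ids t lo hi < ids.length)) && (ids.getD (pvBSearch ids t lo hi) "" == t))
      = decide (t ∈ ids) := by
  have hsor : ∀ i j (hi' : i < ids.length) (hj : j < ids.length), i ≤ j → ids[i] ≤ ids[j] := by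
    intro i j hi' hj hij
    rcases Nat.lt_or_ge i j with h | h
    · exact (List.pairwise_iff_getElem.mp hs) i j hi' hj h
    · have : i = j := Nat.le_antisymm hij h
      subst this; exact le_refl _
  intro n
  induction n using Nat.strong_induction_on with
  | _ n ih =>
    intro lo hi hn hhi hlow hhigh
    by_cases hlh : lo < hi
    · have hmid : (lo + hi) / 2 < ids.length := by omega
      rw [pvBSearch, if_pos hlh]
      simp only []
      set mid := (lo + hi) / 2 with hmiddef
      by_cases hc : ids.getD mid "" < t
      · have hc' : ids[mid] < t := by rwa [List.getD_eq_getElem ids "" hmid] at hc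
        rw [if_pos hc]
        refine ih (hi - (mid + 1)) (by omega) (mid + 1) hi (rfl) hhi ?_ hhigh
        intro i h hilt
        calc ids[i] ≤ ids[mid] := hsor i mid h hmid (by omega)
          _ < t := hc'
      · have hc' : t ≤ ids[mid] := by
          rw [List.getD_eq_getElem ids "" hmid] at hc; exact le_of_not_gt hc
        rw [if_neg hc]
        refine ih (mid - lo) (by omega) lo mid (rfl) (by omega) hlow ?_
        intro i h hige
        calc t ≤ ids[mid] := hc'
          _ ≤ ids[i] := hsor mid i hmid h hige
    · have hle : hi ≤ lo := Nat.le_of_not_lt hlh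
      rw [pvBSearch, if_neg hlh]
      by_cases hlen : lo < ids.length
      · rw [List.getD_eq_getElem ids "" hlen]
        simp only [hlen, decide_true, Bool.true_and]
        apply Bool.eq_iff_iff.mpr
        simp only [beq_iff_eq, decide_eq_true_eq]
        constructor
        · intro h; rw [← h]; exact List.getElem_mem hlen
        · intro hmem
          obtain ⟨i, hi', hieq⟩ := List.getElem_of_mem hmem
          rcases Nat.lt_or_ge i lo with hcase | hcase
          · have := hlow i hi' hcase
            rw [hieq] at this
            exact absurd this (lt_irrefl t)
          · have h1 : ids[lo] ≤ ids[i] := hsor lo i hlen hi' hcase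
            have h2 : t ≤ ids[lo] := hhigh lo hlen hle
            rw [hieq] at h1
            exact le_antisymm h1 h2
      · have hnone : ¬ t ∈ ids := by
          intro hmem
          obtain ⟨i, hi', hieq⟩ := List.getElem_of_mem hmem
          have := hlow i hi' (by omega)
          rw [hieq] at this; exact lt_irrefl t this
        simp [hlen, hnone]

-- membership in A's valid_targets set equals membership of the (nonempty) target in B's
-- raw candidate-id list
theorem pv_ids (tid : String) (h : tid ≠ "") (gaps contradictions : List (List (String × String))) :
    PySem.Set.contains
      (PySem.Set.update
        (PySem.Set.ofList (gaps.filterMap (fun g =>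
          let s := PySem.Str.strip (pvStrGet g "gap_id")
          if s ≠ "" then some s else none)))
        ((pvGetUnresolved contradictions).filterMap (fun c =>
          let s := PySem.Str.strip (pvStrGet c "contradiction_id")
          if s ≠ "" then some s else none))) tid
    = decide (tid ∈
        gaps.map (fun g => PySem.Str.strip ((PySem.Dict.mk g).getD "gap_id" "")) ++
        (contradictions.filter (fun c =>
          (PySem.Dict.mk c).get? "current_resolution_state" == some "unresolved" ||
          (PySem.Dict.mk c).get? "current_resolution_state" == some "partially_resolved")).map
          (fun c => PySem.Str.strip ((PySem.Dict.mk c).getD "contradiction_id" ""))) := by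
  apply Bool.eq_iff_iff.mpr
  simp only [PySem.Set.contains_iff, PySem.Set.mem_update, PySem.Set.mem_ofList,
    List.mem_filterMap, pvGetUnresolved, List.mem_filter, List.mem_append, List.mem_map,
    decide_eq_true_eq, pvStrGet]
  constructor
  · rintro (⟨g, hg, hsv⟩ | ⟨c, hc, hsv⟩)
    · split at hsv
      · exact Or.inl ⟨g, hg, by simpa using hsv⟩
      · simp at hsv
    · split at hsv
      · exact Or.inr ⟨c, hc, by simpa using hsv⟩
      · simp at hsv
  · rintro (⟨g, hg, hsv⟩ | ⟨c, hc, hsv⟩)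
    · exact Or.inl ⟨g, hg, by simp [hsv, h]⟩
    · exact Or.inr ⟨c, ⟨hc.1, hc.2⟩, by simp [hsv, h]⟩

-- ===== VERDICT (by name: the statement is the Claim_ definition above) =====
theorem has_concrete_hold_next_step_spec : Claim_equal_has_concrete_hold_next_step := by
  intro ns gs cs _
  unfold Spec_has_concrete_hold_next_step has_concrete_hold_next_step has_concrete_hold_next_step_alt
  simp only [pvStrGet]
  split
  · rfl
  · by_cases htid : PySem.Str.strip ((PySem.Dict.mk ns).getD "target_gap_or_contradiction_id" "") = ""
    · simp [htid]
    · simp only [htid, if_false, ne_eq, not_false_iff, decide_true, Bool.true_and]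
      set tid := PySem.Str.strip ((PySem.Dict.mk ns).getD "target_gap_or_contradiction_id" "") with htiddef
      set ids := gs.map (fun g => PySem.Str.strip ((PySem.Dict.mk g).getD "gap_id" "")) ++
        (cs.filter (fun c =>
          (PySem.Dict.mk c).get? "current_resolution_state" == some "unresolved" ||
          (PySem.Dict.mk c).get? "current_resolution_state" == some "partially_resolved")).map
          (fun c => PySem.Str.strip ((PySem.Dict.mk c).getD "contradiction_id" "")) with hids
      have hsorted : (PySem.List.sorted ids (fun x => x) false).Pairwise (· ≤ ·) := by
        simpa using PySem.List.sorted_pairwise (xs := ids) (key := fun x => x)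
      have hbs := pvBSearch_mem (PySem.List.sorted ids (fun x => x) false) tid hsorted
        ((PySem.List.sorted ids (fun x => x) false).length) 0
        ((PySem.List.sorted ids (fun x => x) false).length) rfl (le_refl _)
        (by intro i h hi0; omega) (by intro i h hge; omega)
      have hA := pv_ids tid htid gs cs
      simp only [pvStrGet] at hA
      rw [hA, ← hids, hbs]
      simp [PySem.List.mem_sorted]
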